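-- pv_equiv track=rewrite | github.com/KimTsegzc/Peel_Potato | peel_potato_logic.py | expand_column_range
-- ===== SOURCE A (Python) =====
-- def col_letter_to_index(letter: str):
--     """Convert Excel column letters like 'A' or 'AA' to 1-based index.
--     Returns None for invalid input.
--     """
--     if letter is None:
--         return None
--     letter = letter.strip().upper()
--     if not letter.isalpha():
--         return None
--     result = 0
--     for ch in letter:
--         result = result * 26 + (ord(ch) - ord('A') + 1)
--     return result
--
-- def expand_column_range(cols_str: str):
--     """Expand a column specification into a list of column letters.
--     Accepts forms like 'B,E' or 'B:E' or 'B:C,E'.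
--     Returns list of uppercase column letters.
--     """
--     if not cols_str:
--         return []
--     cols = []
--     cols_str = cols_str.strip().upper()
--     # continuous range like B:E (and no comma)
--     if ':' in cols_str and ',' not in cols_str:
--         parts = [p.strip() for p in cols_str.split(':')]
--         if len(parts) == 2:
--             start_idx = col_letter_to_index(parts[0])
--             end_idx = col_letter_to_index(parts[1])
--             if start_idx and end_idx and start_idx <= end_idx:
--                 for i in range(start_idx, end_idx + 1):
--                     col = ''
--                     idx = i
--                     while idx > 0:
--                         idx, rem = divmod(idx - 1, 26)
--                         col = chr(65 + rem) + col
--                     cols.append(col)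
--         return cols
--
--     # comma-separated parts
--     for part in cols_str.split(','):
--         part = part.strip()
--         if not part:
--             continue
--         if ':' in part:
--             sub = [s.strip() for s in part.split(':')]
--             if len(sub) == 2:
--                 s_idx = col_letter_to_index(sub[0])
--                 e_idx = col_letter_to_index(sub[1])
--                 if s_idx and e_idx and s_idx <= e_idx:
--                     for i in range(s_idx, e_idx + 1):
--                         col = ''
--                         idx = i
--                         while idx > 0:
--                             idx, rem = divmod(idx - 1, 26)
--                             col = chr(65 + rem) + col
--                         cols.append(col)
--         else:
--             if part.isalpha():
--                 cols.append(part)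
--     return cols
-- ===== SOURCE B (Python) =====
-- def _succ(s):
--     """Next Excel column label after s: string odometer, Z -> AA (no arithmetic)."""
--     if not s:
--         return 'A'
--     if s[-1] != 'Z':
--         return s[:-1] + chr(ord(s[-1]) + 1)
--     return _succ(s[:-1]) + 'A'
--
-- def expand_column_range(cols_str: str):
--     """Expand a column specification into a list of column letters.
--     Works entirely on letter strings: ranges are walked with the string
--     successor _succ, ordering is shortlex on the labels (len, then lexicographic),
--     so no letter<->number conversion ever happens.
--     """
--     if not cols_str:
--         return []
--     out = []
--     for raw in cols_str.strip().upper().split(','):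
--         part = raw.strip()
--         if ':' in part:
--             ends = [x.strip() for x in part.split(':')]
--             if (len(ends) == 2 and ends[0].isalpha() and ends[1].isalpha()
--                     and (len(ends[0]), ends[0]) <= (len(ends[1]), ends[1])):
--                 cur = ends[0]
--                 while True:
--                     out.append(cur)
--                     if cur == ends[1]:
--                         break
--                     cur = _succ(cur)
--         elif part.isalpha():
--             out.append(part)
--     return out
-- ===== Notes on version B (the rewrite author's own statement) =====
-- stated objective: alternative
-- what changed: B never converts between letters and numbers: it walks a range with a string-odometer successor (Z->AA) and decides the range guard by shortlex comparison of the labels ((len,str) tuple), collecting labels directly in one comma-pass, instead of A's letter->base-26-index conversion, integer range, and divmod index->letter rendering (whose lone-colon special branch B also drops as redundant).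
import Mathlib
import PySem

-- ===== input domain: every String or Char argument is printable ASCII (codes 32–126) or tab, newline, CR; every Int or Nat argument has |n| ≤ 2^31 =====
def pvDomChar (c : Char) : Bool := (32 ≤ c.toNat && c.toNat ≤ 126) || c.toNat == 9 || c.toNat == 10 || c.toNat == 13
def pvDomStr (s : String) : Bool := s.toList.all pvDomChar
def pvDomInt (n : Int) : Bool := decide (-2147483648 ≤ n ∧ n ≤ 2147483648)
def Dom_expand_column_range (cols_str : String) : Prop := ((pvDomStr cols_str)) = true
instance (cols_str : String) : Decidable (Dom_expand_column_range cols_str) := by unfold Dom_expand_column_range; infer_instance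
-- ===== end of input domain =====

-- B works purely on letter strings: ranges are walked with a string-odometer successor (Z -> AA)
-- under a shortlex comparison of the labels, with no letter<->number conversion and without A's
-- redundant lone-colon special branch (objective: alternative).

-- ===== PORT A =====
-- Strings are ported through List Char (PySem.Chars); the growing `cols` list is kept as
-- List (List Char) and rendered with String.mk at the very end (exact: Python strings are char sequences).

-- helper `col_letter_to_index` of A; the `letter is None` branch is dropped because A only ever
-- passes real strings here.
def col_letter_to_index (letter : List Char) : Option Int :=
  let l := PySem.Chars.upper (PySem.Chars.strip letter)
  if PySem.Chars.strIsalpha l then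
    some (l.foldl (fun result ch => result * 26 + ((ch.toNat : Int) - 65 + 1)) 0)
  else none

-- the inner `while idx > 0` loop of A (col = chr(65 + rem) + col)
def idx_to_col_A (i : Int) (col : List Char) : List Char :=
  if _h : 0 < i then
    idx_to_col_A (PySem.Int.floordiv (i - 1) 26) (Char.ofNat (65 + (PySem.Int.mod (i - 1) 26).toNat) :: col)
  else col
termination_by i.toNat
decreasing_by
  rw [PySem.Int.floordiv_eq_ediv_of_pos (by omega : (0:Int) < 26)]
  omega

def expand_column_range (cols_str : String) : List String :=
  if cols_str.toList.isEmpty then [] else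
  let cs := PySem.Chars.upper (PySem.Chars.strip cols_str.toList)
  let cols : List (List Char) :=
    if PySem.Chars.isIn [':'] cs && !(PySem.Chars.isIn [','] cs) then
      let parts := (PySem.Chars.splitOn cs [':']).map PySem.Chars.strip
      if parts.length = 2 then
        match col_letter_to_index parts[0]!, col_letter_to_index parts[1]! with
        | some s, some e =>
          -- Python truthiness: `if start_idx and end_idx and start_idx <= end_idx`
          if s ≠ 0 ∧ e ≠ 0 ∧ s ≤ e then
            (PySem.List.pyRange s (e + 1) 1).foldl (fun acc i => acc ++ [idx_to_col_A i []]) []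
          else []
        | some _, none => []
        | none, _ => []
      else []
    else
      (PySem.Chars.splitOn cs [',']).foldl (fun acc p =>
        let part := PySem.Chars.strip p
        if part.isEmpty then acc
        else if PySem.Chars.isIn [':'] part then
          let sub := (PySem.Chars.splitOn part [':']).map PySem.Chars.strip
          if sub.length = 2 then
            match col_letter_to_index sub[0]!, col_letter_to_index sub[1]! with
            | some s, some e =>
              if s ≠ 0 ∧ e ≠ 0 ∧ s ≤ e then
                (PySem.List.pyRange s (e + 1) 1).foldl (fun a2 i => a2 ++ [idx_to_col_A i []]) acc
              else acc
            | some _, none => acc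
            | none, _ => acc
          else acc
        else if PySem.Chars.strIsalpha part then acc ++ [part] else acc) []
  cols.map String.mk

-- ===== PORT B =====
-- helper `_succ` of B: the string odometer (s[-1] is `getLast`, s[:-1] is `dropLast`)
def succ_col (s : List Char) : List Char :=
  if h : s.isEmpty then ['A']
  else
    let c := s.getLast (by simpa [List.isEmpty_iff] using h)
    if c ≠ 'Z' then s.dropLast ++ [Char.ofNat (c.toNat + 1)]
    else succ_col s.dropLast ++ ['A']
termination_by s.length
decreasing_by
  rw [List.length_dropLast]
  have hne : s ≠ [] := by simpa [List.isEmpty_iff] using h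
  have := List.length_pos_of_ne_nil hne
  omega

-- Python string `<=` (lexicographic on code points; a strict prefix is smaller) — exact by hand
def lex_le : List Char → List Char → Bool
  | [], _ => true
  | _ :: _, [] => false
  | x :: xs, y :: ys =>
      if x.toNat < y.toNat then true
      else if y.toNat < x.toNat then false
      else lex_le xs ys

-- Python tuple comparison `(len(a), a) <= (len(b), b)` of B's guard `_le`
def col_le (a b : List Char) : Bool :=
  if a.length < b.length then true
  else if b.length < a.length then false
  else lex_le a b

-- base-26 value of a label; used by the port ONLY as the fuel/termination measure of the
-- `while True` loop below (the Python loop terminates because the shortlex guard held)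
def col_to_index (s : List Char) : Int :=
  s.foldl (fun r ch => r * 26 + ((ch.toNat : Int) - 64)) 0

-- B's `while True: out.append(cur); if cur == ends[1]: break; cur = _succ(cur)`
def expand_loop (fuel : Nat) (cur e : List Char) (acc : List (List Char)) : List (List Char) :=
  if cur = e then acc ++ [cur]
  else
    match fuel with
    | 0 => acc ++ [cur]
    | n + 1 => expand_loop n (succ_col cur) e (acc ++ [cur])

def expand_column_range_alt (cols_str : String) : List String :=
  if cols_str.toList.isEmpty then [] else
  let out : List (List Char) :=
    (PySem.Chars.splitOn (PySem.Chars.upper (PySem.Chars.strip cols_str.toList)) [',']).foldl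
      (fun acc raw =>
        let part := PySem.Chars.strip raw
        if PySem.Chars.isIn [':'] part then
          let ends := (PySem.Chars.splitOn part [':']).map PySem.Chars.strip
          if ends.length = 2 ∧ PySem.Chars.strIsalpha ends[0]! ∧ PySem.Chars.strIsalpha ends[1]!
              ∧ col_le ends[0]! ends[1]! = true then
            expand_loop (col_to_index ends[1]! - col_to_index ends[0]!).toNat ends[0]! ends[1]! acc
          else acc
        else if PySem.Chars.strIsalpha part then acc ++ [part] else acc) []
  out.map String.mk

-- ===== PRECONDITION & SPEC =====
def Spec_expand_column_range (cols_str : String) (out : List String) : Prop := out = expand_column_range_alt cols_str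
instance (cols_str : String) (out : List String) : Decidable (Spec_expand_column_range cols_str out) := by unfold Spec_expand_column_range; infer_instance

-- ===== CLAIM (what is proved, stated in full; the proofs are below) =====
def Claim_equal_expand_column_range : Prop := ∀ (cols_str : String), Dom_expand_column_range cols_str → Spec_expand_column_range cols_str (expand_column_range cols_str)

-- ===== LEMMAS AND PROOFS =====

-- render an index as letters (A's inner loop, empty accumulator)
def gIdx (i : Int) : List Char := idx_to_col_A i []

-- ---- character-level facts (PySem's islower/isupper/isspace are the exact Python predicates) ----
theorem char_le_iff (a b : Char) : a ≤ b ↔ a.toNat ≤ b.toNat := by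
  rw [Char.le_def, UInt32.le_iff_toNat_le]; rfl

theorem char_eq_of_toNat_eq (a b : Char) (h : a.toNat = b.toNat) : a = b := by
  rw [← Char.ofNat_toNat a, ← Char.ofNat_toNat b, h]

theorem islower_iff (c : Char) : PySem.Chars.islower c = true ↔ 97 ≤ c.toNat ∧ c.toNat ≤ 122 := by
  simp only [PySem.Chars.islower, Bool.and_eq_true, decide_eq_true_eq, char_le_iff]
  exact Iff.rfl

theorem isupper_iff (c : Char) : PySem.Chars.isupper c = true ↔ 65 ≤ c.toNat ∧ c.toNat ≤ 90 := by
  simp only [PySem.Chars.isupper, Bool.and_eq_true, decide_eq_true_eq, char_le_iff]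
  exact Iff.rfl

theorem toNat_upperChar (c : Char) :
    (PySem.Chars.upperChar c).toNat = if 97 ≤ c.toNat ∧ c.toNat ≤ 122 then c.toNat - 32 else c.toNat := by
  unfold PySem.Chars.upperChar
  by_cases h : PySem.Chars.islower c = true
  · rw [if_pos h]
    rw [islower_iff] at h
    rw [if_pos h]
    have hv : Nat.isValidChar (c.toNat - 32) := by left; omega
    unfold Char.ofNat
    rw [dif_pos hv]
    exact Char.toNat_ofNatAux hv
  · rw [if_neg h, if_neg (by rw [← islower_iff]; exact h)]

theorem islower_upperChar (c : Char) : PySem.Chars.islower (PySem.Chars.upperChar c) = false := by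
  rw [← Bool.not_eq_true, islower_iff, toNat_upperChar]
  by_cases h : 97 ≤ c.toNat ∧ c.toNat ≤ 122 <;> simp [h] <;> omega

theorem upperChar_of_not_lower (c : Char) (h : PySem.Chars.islower c = false) :
    PySem.Chars.upperChar c = c := by
  unfold PySem.Chars.upperChar; rw [h]; simp

theorem isspace_upperChar (c : Char) : PySem.Chars.isspace (PySem.Chars.upperChar c) = PySem.Chars.isspace c := by
  by_cases h : PySem.Chars.islower c = true
  · have h' := (islower_iff c).mp h
    have h1 : PySem.Chars.isspace c = false := by
      rw [← Bool.not_eq_true]; unfold PySem.Chars.isspace; simp; omega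
    have h2 : PySem.Chars.isspace (PySem.Chars.upperChar c) = false := by
      rw [← Bool.not_eq_true]; unfold PySem.Chars.isspace
      simp [toNat_upperChar, h']
      omega
    rw [h1, h2]
  · rw [upperChar_of_not_lower c (by simpa using h)]

theorem alpha_not_lower_bounds (c : Char) (ha : PySem.Chars.isalpha c = true)
    (hl : PySem.Chars.islower c = false) : 65 ≤ c.toNat ∧ c.toNat ≤ 90 := by
  unfold PySem.Chars.isalpha at ha
  rw [hl] at ha
  simp at ha
  exact (isupper_iff c).mp ha

-- ---- upper / strip structure ----
theorem upper_not_lower (l : List Char) : ∀ c ∈ PySem.Chars.upper l, PySem.Chars.islower c = false := by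
  intro c hc
  unfold PySem.Chars.upper at hc
  obtain ⟨d, _, rfl⟩ := List.mem_map.mp hc
  exact islower_upperChar d

theorem upper_of_not_lower (l : List Char) (h : ∀ c ∈ l, PySem.Chars.islower c = false) :
    PySem.Chars.upper l = l := by
  unfold PySem.Chars.upper
  induction l with
  | nil => rfl
  | cons a t ih =>
      simp only [List.map_cons]
      rw [upperChar_of_not_lower a (h a List.mem_cons_self),
        ih (fun c hc => h c (List.mem_cons_of_mem a hc))]

theorem mem_lstrip (l : List Char) (c : Char) (h : c ∈ PySem.Chars.lstrip l) : c ∈ l := by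
  unfold PySem.Chars.lstrip at h
  exact (List.dropWhile_sublist _).mem h

theorem mem_rstrip (l : List Char) (c : Char) (h : c ∈ PySem.Chars.rstrip l) : c ∈ l := by
  unfold PySem.Chars.rstrip at h
  rw [List.mem_reverse] at h
  have := (List.dropWhile_sublist (l := l.reverse) (p := PySem.Chars.isspace)).mem h
  simpa using this

theorem mem_strip (l : List Char) (c : Char) (h : c ∈ PySem.Chars.strip l) : c ∈ l := by
  unfold PySem.Chars.strip at h
  exact mem_lstrip l c (mem_rstrip _ c h)

-- head of a dropWhile fails the predicate
theorem head?_dropWhile_false (p : Char → Bool) (l : List Char) (c : Char)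
    (h : (List.dropWhile p l).head? = some c) : p c = false := by
  have := List.head?_dropWhile_not (p := p) (l := l)
  rw [h] at this
  simpa using this

theorem lstrip_eq_self (l : List Char)
    (h : ∀ c, l.head? = some c → PySem.Chars.isspace c = false) : PySem.Chars.lstrip l = l := by
  unfold PySem.Chars.lstrip
  cases l with
  | nil => rfl
  | cons a t => rw [List.dropWhile_cons_of_neg (by simp [h a rfl])]

theorem rstrip_eq_self (l : List Char)
    (h : ∀ c, l.getLast? = some c → PySem.Chars.isspace c = false) : PySem.Chars.rstrip l = l := by
  unfold PySem.Chars.rstrip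
  have : List.dropWhile PySem.Chars.isspace l.reverse = l.reverse := by
    cases hr : l.reverse with
    | nil => rfl
    | cons a t =>
        rw [List.dropWhile_cons_of_neg]
        simp only [Bool.not_eq_true]
        apply h
        rw [← List.head?_reverse, hr]
        rfl
  rw [this, List.reverse_reverse]

theorem strip_head (l : List Char) (c : Char) (h : (PySem.Chars.strip l).head? = some c) :
    PySem.Chars.isspace c = false := by
  unfold PySem.Chars.strip PySem.Chars.rstrip at h
  set m := PySem.Chars.lstrip l with hm
  have hpre : (List.dropWhile PySem.Chars.isspace m.reverse).reverse <+: m := by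
    have hsuf : List.dropWhile PySem.Chars.isspace m.reverse <:+ m.reverse := List.dropWhile_suffix _
    have h2 : (List.dropWhile PySem.Chars.isspace m.reverse).reverse <+: m.reverse.reverse :=
      List.reverse_prefix.mpr hsuf
    simpa using h2
  obtain ⟨r, hr⟩ := hpre
  cases hx : (List.dropWhile PySem.Chars.isspace m.reverse).reverse with
  | nil => rw [hx] at h; simp at h
  | cons a t =>
      rw [hx] at h
      simp only [List.head?_cons, Option.some.injEq] at h
      subst h
      have hhead : m.head? = some a := by
        rw [← hr, hx]; rfl
      exact head?_dropWhile_false _ l a (by unfold PySem.Chars.lstrip at hm; rw [← hm]; exact hhead)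

theorem strip_last (l : List Char) (c : Char) (h : (PySem.Chars.strip l).getLast? = some c) :
    PySem.Chars.isspace c = false := by
  unfold PySem.Chars.strip PySem.Chars.rstrip at h
  rw [← List.head?_reverse, List.reverse_reverse] at h
  exact head?_dropWhile_false _ _ c h

theorem strip_idem (l : List Char) : PySem.Chars.strip (PySem.Chars.strip l) = PySem.Chars.strip l := by
  have h1 : PySem.Chars.lstrip (PySem.Chars.strip l) = PySem.Chars.strip l :=
    lstrip_eq_self _ (strip_head l)
  show PySem.Chars.rstrip (PySem.Chars.lstrip (PySem.Chars.strip l)) = PySem.Chars.strip l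
  rw [h1]
  exact rstrip_eq_self _ (strip_last l)

theorem strip_upper (l : List Char) :
    PySem.Chars.strip (PySem.Chars.upper l) = PySem.Chars.upper (PySem.Chars.strip l) := by
  have hcomp : (PySem.Chars.isspace ∘ PySem.Chars.upperChar) = PySem.Chars.isspace := by
    funext c; exact isspace_upperChar c
  show PySem.Chars.rstrip (PySem.Chars.lstrip _) = _
  unfold PySem.Chars.lstrip PySem.Chars.rstrip PySem.Chars.upper
  rw [List.dropWhile_map, hcomp, ← List.map_reverse, List.dropWhile_map, hcomp, ← List.map_reverse]
  rfl

-- ---- splitOn facts ----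
theorem splitOn_go_charset (Q : Char → Prop) (sep : List Char) :
    ∀ (fuel : Nat) (l cur : List Char) (acc : List (List Char)),
      (∀ c ∈ l, Q c) → (∀ c ∈ cur, Q c) → (∀ p ∈ acc, ∀ c ∈ p, Q c) →
      ∀ p ∈ PySem.Chars.splitOn.go sep fuel l cur acc, ∀ c ∈ p, Q c := by
  intro fuel
  induction fuel with
  | zero =>
      intro l cur acc hl hcur hacc p hp c hc
      rw [PySem.Chars.splitOn.go] at hp
      simp at hp
      rcases hp with hp | hp
      · exact hacc p hp c hc
      · subst hp
        rcases List.mem_append.mp hc with h | h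
        · exact hcur c (by simpa using h)
        · exact hl c h
  | succ fuel ih =>
      intro l cur acc hl hcur hacc p hp c hc
      cases l with
      | nil =>
          rw [PySem.Chars.splitOn.go] at hp
          simp at hp
          rcases hp with hp | hp
          · exact hacc p hp c hc
          · subst hp; exact hcur c (by simpa using hc)
          · omega
      | cons a rest =>
          rw [PySem.Chars.splitOn.go] at hp
          by_cases hpre : sep.isPrefixOf (a :: rest) = true
          · rw [if_pos hpre] at hp
            refine ih _ _ _ ?_ ?_ ?_ p hp c hc
            · intro d hd; exact hl d (List.mem_of_mem_drop hd)
            · intro d hd; simp at hd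
            · intro q hq d hd
              simp at hq
              rcases hq with hq | hq
              · subst hq; exact hcur d (by simpa using hd)
              · exact hacc q hq d hd
          · rw [if_neg hpre] at hp
            refine ih _ _ _ ?_ ?_ hacc p hp c hc
            · intro d hd; exact hl d (List.mem_cons_of_mem a hd)
            · intro d hd
              rcases List.mem_cons.mp hd with h | h
              · subst h; exact hl d (List.mem_cons_self)
              · exact hcur d h

theorem splitOn_charset (Q : Char → Prop) (s sep : List Char) (h : ∀ c ∈ s, Q c) :
    ∀ p ∈ PySem.Chars.splitOn s sep, ∀ c ∈ p, Q c := by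
  unfold PySem.Chars.splitOn
  exact splitOn_go_charset Q sep _ s [] [] h (by simp) (by simp)

theorem splitOn_go_no_sep (sc : Char) :
    ∀ (fuel : Nat) (l cur : List Char) (acc : List (List Char)), sc ∉ l →
      PySem.Chars.splitOn.go [sc] fuel l cur acc = acc.reverse ++ [cur.reverse ++ l] := by
  intro fuel
  induction fuel with
  | zero => intro l cur acc _; rw [PySem.Chars.splitOn.go]; simp
  | succ fuel ih =>
      intro l cur acc hl
      cases l with
      | nil =>
          rw [PySem.Chars.splitOn.go]
          · simp
          · omega
      | cons a rest =>
          rw [PySem.Chars.splitOn.go]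
          have hne : ¬ [sc].isPrefixOf (a :: rest) = true := by
            simp [List.isPrefixOf]
            intro h
            exact (by simpa [h] using hl : sc ∉ (sc :: rest)) (List.mem_cons_self)
          rw [if_neg hne]
          rw [ih rest (a :: cur) acc (fun h => hl (List.mem_cons_of_mem a h))]
          simp

theorem splitOn_no_sep (s : List Char) (sc : Char) (h : sc ∉ s) :
    PySem.Chars.splitOn s [sc] = [s] := by
  unfold PySem.Chars.splitOn
  rw [splitOn_go_no_sep sc _ s [] [] h]
  simp

theorem isIn_single (c : Char) (s : List Char) : PySem.Chars.isIn [c] s = true ↔ c ∈ s := by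
  rw [PySem.Chars.isIn_iff_infix]
  exact List.singleton_infix_iff c s

-- ---- base-26 value arithmetic ----
theorem col_to_index_mono (l : List Char) : ∀ r : Int, 0 ≤ r → (∀ c ∈ l, 65 ≤ c.toNat) →
    r ≤ l.foldl (fun r ch => r * 26 + ((ch.toNat : Int) - 64)) r := by
  induction l with
  | nil => intro r _ _; simp
  | cons c t ih =>
      intro r hr hchars
      have hc : (65 : Int) ≤ (c.toNat : Int) := by exact_mod_cast hchars c List.mem_cons_self
      have hstep : r ≤ r * 26 + ((c.toNat : Int) - 64) := by nlinarith
      calc r ≤ r * 26 + ((c.toNat : Int) - 64) := hstep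
        _ ≤ t.foldl (fun r ch => r * 26 + ((ch.toNat : Int) - 64)) (r * 26 + ((c.toNat : Int) - 64)) :=
            ih _ (by omega) (fun d hd => hchars d (List.mem_cons_of_mem c hd))
        _ = (c :: t).foldl (fun r ch => r * 26 + ((ch.toNat : Int) - 64)) r := by simp

theorem col_to_index_nonneg (l : List Char) (h : ∀ c ∈ l, 65 ≤ c.toNat) : 0 ≤ col_to_index l :=
  col_to_index_mono l 0 le_rfl h

theorem col_to_index_pos (l : List Char) (hne : l ≠ [])
    (h : ∀ c ∈ l, 65 ≤ c.toNat) : 1 ≤ col_to_index l := by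
  cases l with
  | nil => exact absurd rfl hne
  | cons c t =>
      have hc : (65 : Int) ≤ (c.toNat : Int) := by exact_mod_cast h c List.mem_cons_self
      unfold col_to_index
      calc (1 : Int) ≤ 0 * 26 + ((c.toNat : Int) - 64) := by omega
        _ ≤ t.foldl (fun r ch => r * 26 + ((ch.toNat : Int) - 64)) (0 * 26 + ((c.toNat : Int) - 64)) :=
            col_to_index_mono t _ (by omega) (fun d hd => h d (List.mem_cons_of_mem c hd))
        _ = (c :: t).foldl (fun r ch => r * 26 + ((ch.toNat : Int) - 64)) 0 := by simp

theorem col_to_index_append (l : List Char) (c : Char) :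
    col_to_index (l ++ [c]) = col_to_index l * 26 + ((c.toNat : Int) - 64) := by
  unfold col_to_index
  rw [List.foldl_append]
  rfl

-- value with a starting accumulator
theorem foldl_val_acc (l : List Char) : ∀ r : Int,
    l.foldl (fun r ch => r * 26 + ((ch.toNat : Int) - 64)) r = r * 26 ^ l.length + col_to_index l := by
  induction l with
  | nil => intro r; simp [col_to_index]
  | cons x t ih =>
      intro r
      have h2 : col_to_index (x :: t) = (0 * 26 + ((x.toNat : Int) - 64)) * 26 ^ t.length + col_to_index t :=
        ih (0 * 26 + ((x.toNat : Int) - 64))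
      simp only [List.foldl_cons, List.length_cons]
      rw [ih (r * 26 + ((x.toNat : Int) - 64)), h2]
      ring

theorem col_to_index_cons (x : Char) (t : List Char) :
    col_to_index (x :: t) = ((x.toNat : Int) - 64) * 26 ^ t.length + col_to_index t := by
  have h2 : col_to_index (x :: t) = (0 * 26 + ((x.toNat : Int) - 64)) * 26 ^ t.length + col_to_index t :=
    foldl_val_acc t (0 * 26 + ((x.toNat : Int) - 64))
  rw [h2]
  ring

-- minimal value of a label of given width: loB n = value of n 'A's
def loB : Nat → Int
  | 0 => 0
  | n + 1 => 26 ^ n + loB n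

theorem loB_hi_lt (n : Nat) : 25 * loB n < 26 ^ n := by
  induction n with
  | zero => simp [loB]
  | succ n ih =>
      have : (0:Int) < 26 ^ n := by positivity
      simp only [loB]
      calc 25 * (26 ^ n + loB n) = 25 * 26 ^ n + 25 * loB n := by ring
        _ < 25 * 26 ^ n + 26 ^ n := by omega
        _ = 26 ^ (n + 1) := by ring

theorem loB_mono {n m : Nat} (h : n ≤ m) : loB n ≤ loB m := by
  induction m with
  | zero => simp_all
  | succ m ih =>
      rcases Nat.lt_or_ge n (m + 1) with hlt | hge
      · have : (0:Int) < 26 ^ m := by positivity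
        have := ih (by omega)
        simp only [loB]; omega
      · have : n = m + 1 := by omega
        simp [this]

theorem loB_hi_lt_lo {n m : Nat} (h : n < m) : 26 * loB n < loB m := by
  have h1 : (26:Int) * loB n = loB n + 25 * loB n := by ring
  have h2 := loB_hi_lt n
  have h3 : loB (n + 1) ≤ loB m := loB_mono h
  simp only [loB] at h3
  omega

theorem val_bounds (l : List Char) (h : ∀ c ∈ l, 65 ≤ c.toNat ∧ c.toNat ≤ 90) :
    loB l.length ≤ col_to_index l ∧ col_to_index l ≤ 26 * loB l.length := by
  induction l with
  | nil => simp [col_to_index, loB]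
  | cons x t ih =>
      have hx := h x List.mem_cons_self
      have hx' : (65:Int) ≤ (x.toNat : Int) ∧ (x.toNat : Int) ≤ 90 := by exact_mod_cast hx
      have ht := ih (fun c hc => h c (List.mem_cons_of_mem x hc))
      have hp : (0:Int) < 26 ^ t.length := by positivity
      rw [col_to_index_cons]
      simp only [List.length_cons, loB]
      constructor
      · nlinarith [ht.1, hx'.1]
      · nlinarith [ht.2, hx'.2]

-- shortlex comparison of uppercase labels agrees with their base-26 value order
theorem lex_val (a : List Char) : ∀ b : List Char, a.length = b.length →
    (∀ c ∈ a, 65 ≤ c.toNat ∧ c.toNat ≤ 90) → (∀ c ∈ b, 65 ≤ c.toNat ∧ c.toNat ≤ 90) →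
    (lex_le a b = true → col_to_index a ≤ col_to_index b) ∧
    (lex_le a b = false → col_to_index b < col_to_index a) := by
  induction a with
  | nil =>
      intro b hlen _ _
      cases b with
      | nil => exact ⟨fun _ => le_refl _, fun h => by simp [lex_le] at h⟩
      | cons y ys => simp at hlen
  | cons x xs ih =>
      intro b hlen ha hb
      cases b with
      | nil => simp at hlen
      | cons y ys =>
          have hn : xs.length = ys.length := by simpa using hlen
          have hax := ha x List.mem_cons_self
          have hay := hb y List.mem_cons_self
          have hax' : (65:Int) ≤ (x.toNat : Int) ∧ (x.toNat : Int) ≤ 90 := by exact_mod_cast hax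
          have hay' : (65:Int) ≤ (y.toNat : Int) ∧ (y.toNat : Int) ≤ 90 := by exact_mod_cast hay
          have hxs := val_bounds xs (fun c hc => ha c (List.mem_cons_of_mem x hc))
          have hys := val_bounds ys (fun c hc => hb c (List.mem_cons_of_mem y hc))
          rw [← hn] at hys
          have hp : (0:Int) < 26 ^ xs.length := by positivity
          have hhi := loB_hi_lt xs.length
          rw [col_to_index_cons, col_to_index_cons, ← hn]
          by_cases h1 : x.toNat < y.toNat
          · have h1' : (x.toNat : Int) + 1 ≤ (y.toNat : Int) := by exact_mod_cast h1
            have key : (x.toNat : Int) * 26 ^ xs.length + 26 ^ xs.length ≤ (y.toNat : Int) * 26 ^ xs.length := by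
              nlinarith [hp, h1']
            constructor
            · intro _; linarith [hxs.2, hys.1, hhi, key]
            · intro hf; simp [lex_le, h1] at hf
          · by_cases h2 : y.toNat < x.toNat
            · have h2' : (y.toNat : Int) + 1 ≤ (x.toNat : Int) := by exact_mod_cast h2
              have key : (y.toNat : Int) * 26 ^ xs.length + 26 ^ xs.length ≤ (x.toNat : Int) * 26 ^ xs.length := by
                nlinarith [hp, h2']
              constructor
              · intro ht; simp [lex_le, h1, h2] at ht
              · intro _; linarith [hys.2, hxs.1, hhi, key]
            · have hxy : (x.toNat : Int) = (y.toNat : Int) := by omega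
              have hrec := ih ys hn (fun c hc => ha c (List.mem_cons_of_mem x hc))
                (fun c hc => hb c (List.mem_cons_of_mem y hc))
              have hlex : lex_le (x :: xs) (y :: ys) = lex_le xs ys := by
                simp [lex_le, h1, h2]
              rw [hlex, hxy]
              exact ⟨fun ht => by linarith [hrec.1 ht], fun hf => by linarith [hrec.2 hf]⟩

theorem col_le_iff (a b : List Char)
    (ha : ∀ c ∈ a, 65 ≤ c.toNat ∧ c.toNat ≤ 90) (hb : ∀ c ∈ b, 65 ≤ c.toNat ∧ c.toNat ≤ 90) :
    col_le a b = true ↔ col_to_index a ≤ col_to_index b := by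
  have hba := val_bounds a ha
  have hbb := val_bounds b hb
  unfold col_le
  by_cases h1 : a.length < b.length
  · simp only [h1, if_true, true_iff]
    have := loB_hi_lt_lo (n := a.length) (m := b.length) h1
    omega
  · by_cases h2 : b.length < a.length
    · simp only [h1, if_false, h2, if_true]
      have := loB_hi_lt_lo (n := b.length) (m := a.length) h2
      constructor
      · intro h; simp at h
      · intro h; omega
    · have hlen : a.length = b.length := by omega
      simp only [h1, if_false, h2]
      have := lex_val a b hlen ha hb
      constructor
      · exact this.1
      · intro hle
        cases hx : lex_le a b with
        | true => rfl
        | false => exact absurd hle (by have := this.2 hx; omega)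

-- ---- the odometer successor ----
theorem succ_col_nil : succ_col [] = ['A'] := by
  unfold succ_col; rfl

theorem succ_col_concat (l : List Char) (c : Char) :
    succ_col (l ++ [c]) =
      if c ≠ 'Z' then l ++ [Char.ofNat (c.toNat + 1)] else succ_col l ++ ['A'] := by
  rw [succ_col]
  have hne : (l ++ [c]).isEmpty = false := by simp
  rw [dif_neg (by simp [hne])]
  simp [List.getLast_concat, List.dropLast_concat]

theorem toNat_ofNat_valid (n : Nat) (h : n < 0xD800) : (Char.ofNat n).toNat = n := by
  have hv : Nat.isValidChar n := by left; exact h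
  unfold Char.ofNat
  rw [dif_pos hv]
  exact Char.toNat_ofNatAux hv

theorem succ_upper (s : List Char) (h : ∀ c ∈ s, 65 ≤ c.toNat ∧ c.toNat ≤ 90) :
    (∀ c ∈ succ_col s, 65 ≤ c.toNat ∧ c.toNat ≤ 90) ∧ succ_col s ≠ [] := by
  induction s using List.reverseRecOn with
  | nil =>
      rw [succ_col_nil]
      exact ⟨by intro c hc; simp at hc; subst hc; decide, by simp⟩
  | append_singleton l c ih =>
      have hc := h c (by simp)
      have hl : ∀ d ∈ l, 65 ≤ d.toNat ∧ d.toNat ≤ 90 := fun d hd => h d (by simp [hd])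
      rw [succ_col_concat]
      by_cases hz : c = 'Z'
      · simp only [hz, ne_eq, not_true_eq_false, if_false]
        obtain ⟨ih1, ih2⟩ := ih hl
        refine ⟨?_, by simp⟩
        intro d hd
        rcases List.mem_append.mp hd with hd | hd
        · exact ih1 d hd
        · simp at hd; subst hd; decide
      · simp only [ne_eq, hz, not_false_eq_true, if_true]
        have hz' : c.toNat ≠ 90 := fun he => hz (char_eq_of_toNat_eq c 'Z' (by simpa using he))
        have htn : (Char.ofNat (c.toNat + 1)).toNat = c.toNat + 1 :=
          toNat_ofNat_valid _ (by omega)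
        refine ⟨?_, by simp⟩
        intro d hd
        rcases List.mem_append.mp hd with hd | hd
        · exact hl d hd
        · simp at hd; subst hd; rw [htn]; omega

theorem val_succ (s : List Char) (h : ∀ c ∈ s, 65 ≤ c.toNat ∧ c.toNat ≤ 90) :
    col_to_index (succ_col s) = col_to_index s + 1 := by
  induction s using List.reverseRecOn with
  | nil =>
      rw [succ_col_nil]
      simp [col_to_index]
  | append_singleton l c ih =>
      have hc := h c (by simp)
      have hl : ∀ d ∈ l, 65 ≤ d.toNat ∧ d.toNat ≤ 90 := fun d hd => h d (by simp [hd])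
      rw [succ_col_concat, col_to_index_append]
      by_cases hz : c = 'Z'
      · simp only [hz, ne_eq, not_true_eq_false, if_false]
        rw [col_to_index_append, ih hl]
        have : ('Z').toNat = 90 := by decide
        rw [this]
        have : ('A').toNat = 65 := by decide
        rw [this]
        push_cast
        ring
      · simp only [ne_eq, hz, not_false_eq_true, if_true]
        have hz' : c.toNat ≠ 90 := fun he => hz (char_eq_of_toNat_eq c 'Z' (by simpa using he))
        have htn : (Char.ofNat (c.toNat + 1)).toNat = c.toNat + 1 :=
          toNat_ofNat_valid _ (by omega)
        rw [col_to_index_append, htn]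
        push_cast
        ring

-- ---- canonicity: A's renderer inverts the value of an uppercase label ----
theorem roundtrip (l : List Char) (h : ∀ c ∈ l, 65 ≤ c.toNat ∧ c.toNat ≤ 90) :
    ∀ acc, idx_to_col_A (col_to_index l) acc = l ++ acc := by
  induction l using List.reverseRecOn with
  | nil =>
      intro acc
      rw [idx_to_col_A]
      norm_num [col_to_index]
  | append_singleton l c ih =>
      intro acc
      have hc := h c (by simp)
      have hl : ∀ d ∈ l, 65 ≤ d.toNat ∧ d.toNat ≤ 90 := fun d hd => h d (by simp [hd])
      have hv : 0 ≤ col_to_index l := col_to_index_nonneg l (fun d hd => (hl d hd).1)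
      rw [col_to_index_append]
      set v := col_to_index l with hvdef
      have hpos : 0 < v * 26 + ((c.toNat : Int) - 64) := by omega
      rw [idx_to_col_A, dif_pos hpos]
      have hfd : PySem.Int.floordiv (v * 26 + ((c.toNat : Int) - 64) - 1) 26 = v := by
        rw [PySem.Int.floordiv_eq_ediv_of_pos (by omega : (0:Int) < 26)]
        omega
      have hmd : (PySem.Int.mod (v * 26 + ((c.toNat : Int) - 64) - 1) 26).toNat = c.toNat - 65 := by
        rw [PySem.Int.mod_eq_emod_of_pos (by omega : (0:Int) < 26)]
        omega
      rw [hfd, hmd]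
      have hch : Char.ofNat (65 + (c.toNat - 65)) = c := by
        have h65 : 65 + (c.toNat - 65) = c.toNat := by omega
        rw [h65, Char.ofNat_toNat]
      rw [hch, ih hl (c :: acc)]
      simp

theorem gIdx_canon (l : List Char) (h : ∀ c ∈ l, 65 ≤ c.toNat ∧ c.toNat ≤ 90) :
    gIdx (col_to_index l) = l := by
  unfold gIdx
  rw [roundtrip l h []]
  simp

-- ---- B's while loop produces exactly A's rendered integer range ----
theorem loop_eq (e : List Char) (he : ∀ c ∈ e, 65 ≤ c.toNat ∧ c.toNat ≤ 90) :
    ∀ (fuel : Nat) (cur : List Char) (acc : List (List Char)),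
      (∀ c ∈ cur, 65 ≤ c.toNat ∧ c.toNat ≤ 90) →
      col_to_index e = col_to_index cur + fuel →
      expand_loop fuel cur e acc =
        acc ++ (PySem.List.pyRange (col_to_index cur) (col_to_index e + 1) 1).map gIdx := by
  intro fuel
  induction fuel with
  | zero =>
      intro cur acc hcur hval
      have hve : col_to_index e = col_to_index cur := by omega
      have hcureq : cur = e := by
        rw [← gIdx_canon cur hcur, ← gIdx_canon e he, hve]
      have hcanon : gIdx (col_to_index cur) = cur := gIdx_canon cur hcur
      rw [expand_loop, if_pos hcureq]
      rw [PySem.List.pyRange_one_cons (by omega),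
        PySem.List.pyRange_one_eq_nil (by omega)]
      simp [hcanon]
  | succ n ih =>
      intro cur acc hcur hval
      have hlt : col_to_index cur < col_to_index e := by omega
      have hne : cur ≠ e := by
        intro h; subst h; omega
      rw [expand_loop, if_neg hne]
      have hsu := succ_upper cur hcur
      have hsv := val_succ cur hcur
      have hcanon : gIdx (col_to_index cur) = cur := gIdx_canon cur hcur
      rw [ih (succ_col cur) (acc ++ [cur]) hsu.1 (by omega), hsv]
      rw [PySem.List.pyRange_one_cons (a := col_to_index cur) (b := col_to_index e + 1) (by omega)]
      rw [List.map_cons, hcanon]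
      simp

theorem strIsalpha_iff (x : List Char) :
    PySem.Chars.strIsalpha x = true ↔ x ≠ [] ∧ ∀ c ∈ x, PySem.Chars.isalpha c = true := by
  unfold PySem.Chars.strIsalpha
  simp [List.isEmpty_iff, List.all_eq_true]

theorem alpha_bounds (x : List Char) (ha : PySem.Chars.strIsalpha x = true)
    (hQ : ∀ c ∈ x, PySem.Chars.islower c = false) :
    ∀ c ∈ x, 65 ≤ c.toNat ∧ c.toNat ≤ 90 := by
  intro c hc
  exact alpha_not_lower_bounds c (((strIsalpha_iff x).mp ha).2 c hc) (hQ c hc)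

-- value of A's helper on an already stripped, already uppercased string
theorem col_letter_to_index_eq (x : List Char) (hstrip : PySem.Chars.strip x = x)
    (hQ : ∀ c ∈ x, PySem.Chars.islower c = false) :
    col_letter_to_index x = if PySem.Chars.strIsalpha x then some (col_to_index x) else none := by
  unfold col_letter_to_index
  rw [hstrip, upper_of_not_lower x hQ]
  have hfun : (fun (result : Int) (ch : Char) => result * 26 + ((ch.toNat : Int) - 65 + 1))
      = (fun (r : Int) (ch : Char) => r * 26 + ((ch.toNat : Int) - 64)) := by
    funext r ch; ring
  rw [hfun]
  rfl

-- the colon branch of A equals the colon branch of B, for any accumulator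
theorem colon_eq (sub : List (List Char))
    (hsub : ∀ x ∈ sub, PySem.Chars.strip x = x ∧ ∀ c ∈ x, PySem.Chars.islower c = false)
    (acc : List (List Char)) :
    (if sub.length = 2 then
       match col_letter_to_index sub[0]!, col_letter_to_index sub[1]! with
       | some s, some e =>
         if s ≠ 0 ∧ e ≠ 0 ∧ s ≤ e then
           (PySem.List.pyRange s (e + 1) 1).foldl (fun a2 i => a2 ++ [idx_to_col_A i []]) acc
         else acc
       | some _, none => acc
       | none, _ => acc
     else acc)
    = (if sub.length = 2 ∧ PySem.Chars.strIsalpha sub[0]! ∧ PySem.Chars.strIsalpha sub[1]!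
           ∧ col_le sub[0]! sub[1]! = true then
         expand_loop (col_to_index sub[1]! - col_to_index sub[0]!).toNat sub[0]! sub[1]! acc
       else acc) := by
  by_cases hlen : sub.length = 2
  · obtain ⟨x0, x1, rfl⟩ := List.length_eq_two.mp hlen
    have hx0 := hsub x0 (by simp)
    have hx1 := hsub x1 (by simp)
    simp only [List.getElem!_cons_zero, List.getElem!_cons_succ, hlen, if_pos, true_and]
    rw [col_letter_to_index_eq x0 hx0.1 hx0.2, col_letter_to_index_eq x1 hx1.1 hx1.2]
    by_cases ha0 : PySem.Chars.strIsalpha x0 = true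
    · by_cases ha1 : PySem.Chars.strIsalpha x1 = true
      · rw [if_pos ha0, if_pos ha1]
        simp only [ha0, ha1, true_and]
        have hb0 := alpha_bounds x0 ha0 hx0.2
        have hb1 := alpha_bounds x1 ha1 hx1.2
        have hp0 : 1 ≤ col_to_index x0 :=
          col_to_index_pos x0 ((strIsalpha_iff x0).mp ha0).1 (fun c hc => (hb0 c hc).1)
        have hp1 : 1 ≤ col_to_index x1 :=
          col_to_index_pos x1 ((strIsalpha_iff x1).mp ha1).1 (fun c hc => (hb1 c hc).1)
        have hle_iff := col_le_iff x0 x1 hb0 hb1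
        by_cases hle : col_to_index x0 ≤ col_to_index x1
        · rw [if_pos (by exact ⟨by omega, by omega, hle⟩), if_pos (hle_iff.mpr hle)]
          rw [PySem.List.foldl_append_singleton_eq_map (fun i => idx_to_col_A i [])]
          rw [loop_eq x1 hb1 _ x0 acc hb0 (by omega)]
          rfl
        · rw [if_neg (by intro h; exact hle h.2.2),
            if_neg (by intro h; exact hle (hle_iff.mp h))]
      · rw [if_pos ha0, if_neg ha1, if_neg (by intro h; exact ha1 h.2.1)]
    · rw [if_neg ha0]
      by_cases ha1 : PySem.Chars.strIsalpha x1 = true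
      · rw [if_pos ha1, if_neg (by intro h; exact ha0 h.1)]
      · rw [if_neg ha1, if_neg (by intro h; exact ha0 h.1)]
  · rw [if_neg hlen, if_neg (by intro h; exact hlen h.1)]

-- the two comma-folds are equal step by step
theorem fold_eq (parts : List (List Char))
    (hp : ∀ p ∈ parts, ∀ c ∈ p, PySem.Chars.islower c = false)
    (init : List (List Char)) :
    parts.foldl (fun acc p =>
        let part := PySem.Chars.strip p
        if part.isEmpty then acc
        else if PySem.Chars.isIn [':'] part then
          let sub := (PySem.Chars.splitOn part [':']).map PySem.Chars.strip
          if sub.length = 2 then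
            match col_letter_to_index sub[0]!, col_letter_to_index sub[1]! with
            | some s, some e =>
              if s ≠ 0 ∧ e ≠ 0 ∧ s ≤ e then
                (PySem.List.pyRange s (e + 1) 1).foldl (fun a2 i => a2 ++ [idx_to_col_A i []]) acc
              else acc
            | some _, none => acc
            | none, _ => acc
          else acc
        else if PySem.Chars.strIsalpha part then acc ++ [part] else acc) init
    = parts.foldl (fun acc raw =>
        let part := PySem.Chars.strip raw
        if PySem.Chars.isIn [':'] part then
          let ends := (PySem.Chars.splitOn part [':']).map PySem.Chars.strip
          if ends.length = 2 ∧ PySem.Chars.strIsalpha ends[0]! ∧ PySem.Chars.strIsalpha ends[1]!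
              ∧ col_le ends[0]! ends[1]! = true then
            expand_loop (col_to_index ends[1]! - col_to_index ends[0]!).toNat ends[0]! ends[1]! acc
          else acc
        else if PySem.Chars.strIsalpha part then acc ++ [part] else acc) init := by
  apply PySem.List.foldl_congr_mem
  intro acc p hmem
  have hQ : ∀ c ∈ PySem.Chars.strip p, PySem.Chars.islower c = false :=
    fun c hc => hp p hmem c (mem_strip p c hc)
  set part := PySem.Chars.strip p with hpart
  by_cases hemp : part = []
  · simp only [hemp]
    have h1 : PySem.Chars.isIn [':'] ([] : List Char) = false := by decide
    have h2 : PySem.Chars.strIsalpha ([] : List Char) = false := by decide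
    simp [h1, h2]
  · have hemp' : part.isEmpty = false := by simpa [List.isEmpty_iff] using hemp
    simp only [hemp', Bool.false_eq_true, if_false]
    by_cases hcolon : PySem.Chars.isIn [':'] part = true
    · simp only [hcolon, if_true]
      apply colon_eq
      intro x hx
      obtain ⟨y, hy, rfl⟩ := List.mem_map.mp hx
      exact ⟨strip_idem y, fun c hc => splitOn_charset _ part [':'] hQ y hy c (mem_strip y c hc)⟩
    · simp only [hcolon, Bool.false_eq_true, if_false]

set_option maxHeartbeats 1000000 in
theorem main_eq (cols_str : String) : expand_column_range cols_str = expand_column_range_alt cols_str := by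
  unfold expand_column_range expand_column_range_alt
  by_cases hemp : cols_str.toList.isEmpty
  · rw [if_pos hemp, if_pos hemp]
  · rw [if_neg hemp, if_neg hemp]
    simp only []
    set cs := PySem.Chars.upper (PySem.Chars.strip cols_str.toList) with hcs
    have hQ : ∀ c ∈ cs, PySem.Chars.islower c = false := upper_not_lower _
    have hstripcs : PySem.Chars.strip cs = cs := by
      rw [hcs, strip_upper, strip_idem]
    by_cases hsp : (PySem.Chars.isIn [':'] cs && !(PySem.Chars.isIn [','] cs)) = true
    · rw [if_pos hsp]
      obtain ⟨hcolon, hcomma⟩ := Bool.and_eq_true_iff.mp hsp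
      have hnomem : ',' ∉ cs := by
        intro h
        rw [Bool.not_eq_true'] at hcomma
        exact absurd ((isIn_single ',' cs).mpr h) (by simp [hcomma])
      rw [splitOn_no_sep cs ',' hnomem]
      simp only [List.foldl_cons, List.foldl_nil]
      congr 1
      rw [hstripcs]
      simp only [hcolon, if_true]
      apply colon_eq
      intro x hx
      obtain ⟨y, hy, rfl⟩ := List.mem_map.mp hx
      exact ⟨strip_idem y, fun c hc => splitOn_charset _ cs [':'] hQ y hy c (mem_strip y c hc)⟩
    · rw [if_neg hsp]
      congr 1
      exact fold_eq (PySem.Chars.splitOn cs [','])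
        (fun p hp c hc => splitOn_charset _ cs [','] hQ p hp c hc) []

-- ===== VERDICT (by name: the statement is the Claim_ definition above) =====
theorem expand_column_range_spec : Claim_equal_expand_column_range := by
  intro s _
  unfold Spec_expand_column_range
  exact main_eq s
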